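-- pv_equiv track=rewrite | github.com/evgeniy-kulikov/unified-state-exam | 02/task_02_02.py | fn
-- ===== SOURCE A (Python) =====
-- def fn(a):
--     for x in range(1000):  # целых неотрицательных  x
--         for y in range(1000):  # целых неотрицательных  y
--             f1 = 2 * x + 3 * y != 72
--             f2 =a > x and a > y
--             if not (f1 or f2):
--                 return False
--     return True
-- ===== SOURCE B (Python) =====
-- def fn(a):
--     # 2x+3y=72 with x,y >= 0 forces y = 2k, x = 36-3k for k = 0..12;
--     # check the condition only on these 13 solutions.
--     for k in range(13):
--         x = 36 - 3 * k
--         y = 2 * k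
--         if not (a > x and a > y):
--             return False
--     return True
-- ===== Notes on version B (the rewrite author's own statement) =====
-- stated objective: faster
-- what changed: Instead of scanning all 10^6 (x,y) pairs, B enumerates the 13 nonnegative integer solutions of 2x+3y=72 (x=36-3k, y=2k, k=0..12) and tests the condition only on those.
import Mathlib
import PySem

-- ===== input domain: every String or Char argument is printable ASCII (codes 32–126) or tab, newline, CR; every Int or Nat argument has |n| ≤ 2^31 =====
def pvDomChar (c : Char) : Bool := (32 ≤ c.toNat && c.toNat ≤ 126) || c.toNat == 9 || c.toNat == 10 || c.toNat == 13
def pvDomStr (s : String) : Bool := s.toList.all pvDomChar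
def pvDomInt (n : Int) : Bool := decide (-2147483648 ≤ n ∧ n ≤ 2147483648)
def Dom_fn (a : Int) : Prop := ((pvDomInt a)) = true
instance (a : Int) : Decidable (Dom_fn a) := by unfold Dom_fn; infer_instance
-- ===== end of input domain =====

-- B enumerates only the 13 nonnegative integer solutions of 2x+3y=72 instead of A's 10^6 (x,y) pairs (objective: faster, constant factor).

-- ===== PORT A =====
-- the nested for-loops with early 'return False': both loops pass iff every (x,y) avoids the trigger, i.e. .all
def fn (a : Int) : Bool :=
  (PySem.List.pyRange 0 1000 1).all (fun x =>
    (PySem.List.pyRange 0 1000 1).all (fun y =>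
      decide (2 * x + 3 * y ≠ 72) || (decide (a > x) && decide (a > y))))

-- ===== PORT B =====
def fn_alt (a : Int) : Bool :=
  (PySem.List.pyRange 0 13 1).all (fun k =>
    decide (a > 36 - 3 * k) && decide (a > 2 * k))

-- ===== PRECONDITION & SPEC =====
def Spec_fn (a : Int) (out : Bool) : Prop := out = fn_alt a
instance (a : Int) (out : Bool) : Decidable (Spec_fn a out) := by unfold Spec_fn; infer_instance

-- ===== CLAIM (what is proved, stated in full; the proofs are below) =====
def Claim_equal_fn : Prop := ∀ (a : Int), Dom_fn a → Spec_fn a (fn a)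

-- ===== LEMMAS AND PROOFS =====

-- Both programs answer 'a ≥ 37': this characterisation is the bridge.
lemma fn_eq (a : Int) : fn a = decide (37 ≤ a) := by
  unfold fn
  by_cases h : 37 ≤ a
  · simp only [h, decide_true]
    rw [List.all_eq_true]
    intro x hx
    rw [List.all_eq_true]
    intro y hy
    rw [PySem.List.mem_pyRange_one] at hx hy
    by_cases heq : 2 * x + 3 * y = 72
    · simp only [Bool.or_eq_true, decide_eq_true_eq, Bool.and_eq_true]
      right; constructor <;> [skip; skip] <;> omega
    · simp [heq]
  · simp only [h, decide_false]
    rw [Bool.eq_false_iff, ne_eq, List.all_eq_true]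
    intro hall
    have hx := hall 36 (by rw [PySem.List.mem_pyRange_one]; omega)
    rw [List.all_eq_true] at hx
    have hy := hx 0 (by rw [PySem.List.mem_pyRange_one]; omega)
    simp only [Bool.or_eq_true, decide_eq_true_eq, Bool.and_eq_true] at hy
    omega

lemma fn_alt_eq (a : Int) : fn_alt a = decide (37 ≤ a) := by
  unfold fn_alt
  by_cases h : 37 ≤ a
  · simp only [h, decide_true]
    rw [List.all_eq_true]
    intro k hk
    rw [PySem.List.mem_pyRange_one] at hk
    simp only [Bool.and_eq_true, decide_eq_true_eq]
    omega
  · simp only [h, decide_false]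
    rw [Bool.eq_false_iff, ne_eq, List.all_eq_true]
    intro hall
    have hk := hall 0 (by rw [PySem.List.mem_pyRange_one]; omega)
    simp only [Bool.and_eq_true, decide_eq_true_eq] at hk
    omega

-- ===== VERDICT (by name: the statement is the Claim_ definition above) =====
theorem fn_spec : Claim_equal_fn := by
  intro a _
  unfold Spec_fn
  rw [fn_eq, fn_alt_eq]
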